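-- pv_equiv track=rewrite | github.com/tgn203/lift-project | Algorithm.py | pathing
-- ===== SOURCE A (Python) =====
-- def pathing(currentFloor, queuedFloors): # compares the longest distance the elevator has to travel up, and the longest distance down, and chooses the shorter distance to travel in
--     checkUp = False
--     checkDown = False
--     for i in queuedFloors: # this makes sure the elevator can go up and/or down
--         if i > currentFloor:
--             checkUp = True
--         elif i < currentFloor:
--             checkDown = True
--     if checkUp == False and checkDown == False:
--         return "stop"
--     elif checkUp == False:
--         return "down"
--     elif checkDown == False:
--         return "up"
--
--     finalUp = 0
--     finalDown = 0
--     finalUp = abs(max(queuedFloors) - currentFloor)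
--     finalDown = abs(min(queuedFloors) - currentFloor)
--     if finalUp < finalDown: # the shorter distance is chosen
--         return "up"
--     else:
--         return "down"
-- ===== SOURCE B (Python) =====
-- def pathing(currentFloor, queuedFloors):
--     # Single pass: accumulate the farthest distance upward (u) and downward (d);
--     # no flags, no max()/min() calls, no second pass.
--     u = 0
--     d = 0
--     for f in queuedFloors:
--         if f - currentFloor > u:
--             u = f - currentFloor
--         if currentFloor - f > d:
--             d = currentFloor - f
--     if u == 0 and d == 0:
--         return "stop"
--     if u == 0:
--         return "down"
--     if d == 0:
--         return "up"
--     return "up" if u < d else "down"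
-- ===== Notes on version B (the rewrite author's own statement) =====
-- stated objective: alternative
-- what changed: B makes one pass that accumulates the farthest upward and downward travel distances (clamped at 0) and decides from those two numbers, instead of A's boolean flag-detection loop followed by separate max() and min() passes with abs().
import Mathlib
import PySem

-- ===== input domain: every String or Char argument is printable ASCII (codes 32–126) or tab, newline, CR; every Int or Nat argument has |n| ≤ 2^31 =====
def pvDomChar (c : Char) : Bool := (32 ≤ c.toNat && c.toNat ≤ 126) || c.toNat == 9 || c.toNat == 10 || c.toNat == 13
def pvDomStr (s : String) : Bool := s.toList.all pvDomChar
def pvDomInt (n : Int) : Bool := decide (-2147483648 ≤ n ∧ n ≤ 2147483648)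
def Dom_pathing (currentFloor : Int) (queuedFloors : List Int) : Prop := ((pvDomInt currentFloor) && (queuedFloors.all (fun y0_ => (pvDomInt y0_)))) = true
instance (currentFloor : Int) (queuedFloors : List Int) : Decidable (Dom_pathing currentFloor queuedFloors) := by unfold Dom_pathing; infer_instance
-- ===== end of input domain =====

-- B replaces A's flag loop + max/min passes by a single pass accumulating the farthest up/down distances (alternative decomposition, same O(n)).


-- ===== PORT A =====
def pathing (currentFloor : Int) (queuedFloors : List Int) : String :=
  -- the flag loop
  let st := queuedFloors.foldl
    (fun (p : Bool × Bool) i =>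
      if i > currentFloor then (true, p.2)
      else if i < currentFloor then (p.1, true)
      else p)
    (false, false)
  if st.1 = false ∧ st.2 = false then "stop"
  else if st.1 = false then "down"
  else if st.2 = false then "up"
  else
    match PySem.List.max? queuedFloors (fun x => x) with
    | none => "down"  -- unreachable: both flags true forces queuedFloors ≠ [] (max cannot raise here)
    | some hi =>
      match PySem.List.min? queuedFloors (fun x => x) with
      | none => "down"  -- unreachable likewise
      | some lo =>
        if |hi - currentFloor| < |lo - currentFloor| then "up" else "down"

-- ===== PORT B =====
def pathing_alt (currentFloor : Int) (queuedFloors : List Int) : String :=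
  -- single pass: farthest distances up (st.1) and down (st.2), clamped at 0
  let st := queuedFloors.foldl
    (fun (p : Int × Int) f =>
      (if f - currentFloor > p.1 then f - currentFloor else p.1,
       if currentFloor - f > p.2 then currentFloor - f else p.2))
    (0, 0)
  if st.1 = 0 ∧ st.2 = 0 then "stop"
  else if st.1 = 0 then "down"
  else if st.2 = 0 then "up"
  else if st.1 < st.2 then "up" else "down"

-- ===== PRECONDITION & SPEC =====
def Spec_pathing (currentFloor : Int) (queuedFloors : List Int) (out : String) : Prop := out = pathing_alt currentFloor queuedFloors
instance (currentFloor : Int) (queuedFloors : List Int) (out : String) : Decidable (Spec_pathing currentFloor queuedFloors out) := by unfold Spec_pathing; infer_instance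

-- ===== CLAIM =====
def Claim_equal_pathing : Prop := ∀ (currentFloor : Int) (queuedFloors : List Int), Dom_pathing currentFloor queuedFloors → Spec_pathing currentFloor queuedFloors (pathing currentFloor queuedFloors)

-- ===== LEMMAS AND PROOFS =====

-- A's flag loop computes exactly (any i > c, any i < c), up to the starting state.
theorem pathing_flags (c : Int) (q : List Int) (p : Bool × Bool) :
    q.foldl
      (fun (p : Bool × Bool) i =>
        if i > c then (true, p.2)
        else if i < c then (p.1, true)
        else p) p
    = (p.1 || q.any (fun i => decide (i > c)), p.2 || q.any (fun i => decide (i < c))) := by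
  induction q generalizing p with
  | nil => simp
  | cons h t ih =>
    simp only [List.foldl_cons, List.any_cons, ih]
    by_cases h1 : h > c
    · simp [h1, show ¬ (h < c) by omega]
    · by_cases h2 : h < c
      · simp [h1, h2]
      · simp [h1, h2]

-- B's pair fold splits into two independent running-maximum folds.
theorem bfold_split (c : Int) (q : List Int) (p : Int × Int) :
    q.foldl
      (fun (p : Int × Int) f =>
        (if f - c > p.1 then f - c else p.1,
         if c - f > p.2 then c - f else p.2)) p
    = (q.foldl (fun a f => if f - c > a then f - c else a) p.1,
       q.foldl (fun a f => if c - f > a then c - f else a) p.2) := by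
  induction q generalizing p with
  | nil => simp
  | cons h t ih => simp [List.foldl_cons, ih]

-- Characterisation of a running maximum of g over the list, started at u0.
theorem runmax_spec (g : Int → Int) (q : List Int) (u0 : Int) :
    (q.foldl (fun a f => if g f > a then g f else a) u0 = u0 ∨
      ∃ f ∈ q, q.foldl (fun a f => if g f > a then g f else a) u0 = g f) ∧
    u0 ≤ q.foldl (fun a f => if g f > a then g f else a) u0 ∧
    ∀ f ∈ q, g f ≤ q.foldl (fun a f => if g f > a then g f else a) u0 := by
  induction q generalizing u0 with
  | nil => simp
  | cons h t ih =>
    simp only [List.foldl_cons]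
    by_cases hgt : g h > u0
    · simp only [if_pos hgt]
      obtain ⟨hcase, hle, hall⟩ := ih (g h)
      refine ⟨?_, by omega, ?_⟩
      · rcases hcase with hc | ⟨f, hf, he⟩
        · exact Or.inr ⟨h, by simp, hc⟩
        · exact Or.inr ⟨f, by simp [hf], he⟩
      · intro f hf
        rcases List.mem_cons.mp hf with rfl | hf
        · omega
        · exact hall f hf
    · simp only [if_neg hgt]
      obtain ⟨hcase, hle, hall⟩ := ih u0
      refine ⟨?_, hle, ?_⟩
      · rcases hcase with hc | ⟨f, hf, he⟩
        · exact Or.inl hc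
        · exact Or.inr ⟨f, by simp [hf], he⟩
      · intro f hf
        rcases List.mem_cons.mp hf with rfl | hf
        · omega
        · exact hall f hf

-- ===== VERDICT =====
theorem pathing_spec : Claim_equal_pathing := by
  intro c q _
  show pathing c q = pathing_alt c q
  cases hq : q with
  | nil => simp [pathing, pathing_alt]
  | cons x t =>
    rcases hmax : PySem.List.max? (x :: t) (fun x => x) with _ | hi
    · exact absurd ((PySem.List.max?_eq_none_iff _ _).mp hmax) (by simp)
    rcases hmin : PySem.List.min? (x :: t) (fun x => x) with _ | lo
    · exact absurd ((PySem.List.min?_eq_none_iff _ _).mp hmin) (by simp)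
    have hiMem : hi ∈ x :: t := PySem.List.max?_mem hmax
    have loMem : lo ∈ x :: t := PySem.List.min?_mem hmin
    have hiMax : ∀ y ∈ x :: t, y ≤ hi := fun y hy => PySem.List.max?_isMax hmax y hy
    have loMin : ∀ y ∈ x :: t, lo ≤ y := fun y hy => PySem.List.min?_isMin hmin y hy
    -- characterise B's two accumulators
    obtain ⟨ucase, unn, uall⟩ := runmax_spec (fun f => f - c) (x :: t) 0
    obtain ⟨dcase, dnn, dall⟩ := runmax_spec (fun f => c - f) (x :: t) 0
    set u := (x :: t).foldl (fun a f => if f - c > a then f - c else a) 0 with hu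
    set d := (x :: t).foldl (fun a f => if c - f > a then c - f else a) 0 with hd
    have hue : u = max 0 (hi - c) := by
      have h1 : hi - c ≤ u := uall hi hiMem
      rcases ucase with h0 | ⟨f, hf, he⟩
      · have := hiMax x (by simp); omega
      · have := hiMax f hf; omega
    have hde : d = max 0 (c - lo) := by
      have h1 : c - lo ≤ d := dall lo loMem
      rcases dcase with h0 | ⟨f, hf, he⟩
      · have := loMin x (by simp); omega
      · have := loMin f hf; omega
    have hup : (x :: t).any (fun i => decide (i > c)) = true ↔ c < hi := by
      constructor
      · intro h
        obtain ⟨y, hy, hyc⟩ := List.any_eq_true.mp h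
        have := hiMax y hy
        simp at hyc; omega
      · intro h
        exact List.any_eq_true.mpr ⟨hi, hiMem, by simpa using h⟩
    have hdn : (x :: t).any (fun i => decide (i < c)) = true ↔ lo < c := by
      constructor
      · intro h
        obtain ⟨y, hy, hyc⟩ := List.any_eq_true.mp h
        have := loMin y hy
        simp at hyc; omega
      · intro h
        exact List.any_eq_true.mpr ⟨lo, loMem, by simpa using h⟩
    simp only [pathing, pathing_alt, pathing_flags, bfold_split, hmax, hmin, Bool.false_or,
      ← hu, ← hd]
    by_cases h1 : c < hi
    · by_cases h2 : lo < c
      · have e1 : (x :: t).any (fun i => decide (i > c)) = true := hup.mpr h1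
        have e2 : (x :: t).any (fun i => decide (i < c)) = true := hdn.mpr h2
        simp only [e1, e2]
        have a1 : |hi - c| = hi - c := abs_of_pos (by omega)
        have a2 : |lo - c| = c - lo := by rw [abs_of_neg (by omega)]; ring
        have hu' : u = hi - c := by omega
        have hd' : d = c - lo := by omega
        simp [a1, a2, hu', hd', show hi - c ≠ 0 by omega, show c - lo ≠ 0 by omega]
      · have e1 : (x :: t).any (fun i => decide (i > c)) = true := hup.mpr h1
        have e2 : (x :: t).any (fun i => decide (i < c)) = false := by
          rw [← Bool.not_eq_true, hdn]; omega
        have hd' : d = 0 := by omega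
        simp [e1, e2, hd', show u ≠ 0 by omega]
    · by_cases h2 : lo < c
      · have e1 : (x :: t).any (fun i => decide (i > c)) = false := by
          rw [← Bool.not_eq_true, hup]; omega
        have e2 : (x :: t).any (fun i => decide (i < c)) = true := hdn.mpr h2
        have hu' : u = 0 := by
          have := hiMax lo loMem; omega
        simp [e1, e2, hu', show d ≠ 0 by omega]
      · have e1 : (x :: t).any (fun i => decide (i > c)) = false := by
          rw [← Bool.not_eq_true, hup]; omega
        have e2 : (x :: t).any (fun i => decide (i < c)) = false := by
          rw [← Bool.not_eq_true, hdn]; omega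
        have hu' : u = 0 := by have := hiMax x (by simp); omega
        have hd' : d = 0 := by have := loMin x (by simp); omega
        simp [e1, e2, hu', hd']
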